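-- pv_equiv track=rewrite | github.com/miliar/Code_Jam_Webscraper | Solutions_in_python/Problem_76/bits.py | compar
-- ===== SOURCE A (Python) =====
-- def compar(a, b):
--     while len(a) != len(b):
--         if len(a) > len(b):
--             b = '0' + b
--         elif len(a) < len(b):
--             a = '0' + a
--
--     if a == b:
--         return True
--     return False
-- ===== SOURCE B (Python) =====
-- def compar(a, b):
--     return a.lstrip('0') == b.lstrip('0')
-- ===== Notes on version B (the rewrite author's own statement) =====
-- stated objective: idiomatic
-- what changed: Replaced the while-loop that left-pads the shorter string with '0' until the lengths match (then compares) by a single strip-and-compare of the significant tails: a.lstrip('0') == b.lstrip('0').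
import Mathlib
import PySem

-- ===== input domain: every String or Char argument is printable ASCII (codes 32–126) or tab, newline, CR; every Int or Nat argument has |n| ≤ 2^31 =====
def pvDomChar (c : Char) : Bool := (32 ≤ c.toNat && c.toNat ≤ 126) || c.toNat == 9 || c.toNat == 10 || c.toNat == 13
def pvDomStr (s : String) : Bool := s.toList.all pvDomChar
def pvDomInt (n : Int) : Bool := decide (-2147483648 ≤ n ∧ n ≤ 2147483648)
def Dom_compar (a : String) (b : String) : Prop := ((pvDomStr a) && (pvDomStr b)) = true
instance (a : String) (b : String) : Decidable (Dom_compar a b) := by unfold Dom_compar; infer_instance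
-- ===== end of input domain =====

-- B replaces A's left-zero-padding loop with a single lstrip('0') comparison (idiomatic; no speed claim).

-- ===== PORT A =====
-- the while loop: prepend '0' to the shorter string until the lengths match, then compare
def comparLoop (a b : List Char) : Bool :=
  if a.length ≠ b.length then
    if a.length > b.length then comparLoop a ('0' :: b)
    else comparLoop ('0' :: a) b
  else a == b
termination_by (a.length - b.length) + (b.length - a.length)
decreasing_by
  all_goals simp only [List.length_cons]; omega

def compar (a : String) (b : String) : Bool :=
  comparLoop a.toList b.toList

-- ===== PORT B =====
-- a.lstrip('0') is exactly dropWhile (· == '0') on the character list (single-char strip set)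
def compar_alt (a : String) (b : String) : Bool :=
  (a.toList.dropWhile (· == '0')) == (b.toList.dropWhile (· == '0'))

-- ===== PRECONDITION & SPEC =====
def Spec_compar (a : String) (b : String) (out : Bool) : Prop := out = compar_alt a b
instance (a : String) (b : String) (out : Bool) : Decidable (Spec_compar a b out) := by unfold Spec_compar; infer_instance

-- ===== CLAIM (what is proved, stated in full; the proofs are below) =====
def Claim_equal_compar : Prop := ∀ (a : String) (b : String), Dom_compar a b → Spec_compar a b (compar a b)

-- ===== LEMMAS AND PROOFS =====

-- the leading-zero block of a list is a replicate of '0'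
lemma takeWhile_zero_replicate (x : List Char) :
    x.takeWhile (· == '0') = List.replicate (x.takeWhile (· == '0')).length '0' := by
  rw [List.eq_replicate_iff]
  refine ⟨rfl, ?_⟩
  intro c hc
  have h := List.mem_takeWhile_imp hc
  simpa using h

-- equal-length lists are equal iff their tails after stripping leading zeros are equal
lemma eq_iff_dropWhile_zero_eq (x y : List Char) (h : x.length = y.length) :
    x = y ↔ x.dropWhile (· == '0') = y.dropWhile (· == '0') := by
  constructor
  · intro h'; rw [h']
  · intro hd
    have hx := (List.takeWhile_append_dropWhile (p := (· == '0')) (l := x)).symm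
    have hy := (List.takeWhile_append_dropWhile (p := (· == '0')) (l := y)).symm
    have hlx := congrArg List.length hx
    have hly := congrArg List.length hy
    simp only [List.length_append] at hlx hly
    have hlt : (x.takeWhile (· == '0')).length = (y.takeWhile (· == '0')).length := by
      rw [hd] at hlx
      omega
    have ht : x.takeWhile (· == '0') = y.takeWhile (· == '0') := by
      rw [takeWhile_zero_replicate x, takeWhile_zero_replicate y, hlt]
    rw [hx, hy, ht, hd]

-- prepending '0' does not change the stripped tail
lemma dropWhile_zero_cons (x : List Char) :
    ('0' :: x).dropWhile (· == '0') = x.dropWhile (· == '0') := by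
  simp

-- the padding loop computes the stripped-tail comparison
lemma comparLoop_eq (a b : List Char) :
    comparLoop a b = ((a.dropWhile (· == '0')) == (b.dropWhile (· == '0'))) := by
  unfold comparLoop
  split
  · rename_i hne
    split
    · rw [comparLoop_eq a ('0' :: b), dropWhile_zero_cons]
    · rw [comparLoop_eq ('0' :: a) b, dropWhile_zero_cons]
  · rename_i heq
    have hlen : a.length = b.length := by omega
    have := eq_iff_dropWhile_zero_eq a b hlen
    by_cases h : a = b
    · simp [h]
    · have h2 : ¬ a.dropWhile (· == '0') = b.dropWhile (· == '0') := fun hc => h (this.mpr hc)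
      simp [h, h2]
termination_by (a.length - b.length) + (b.length - a.length)
decreasing_by
  all_goals simp only [List.length_cons]; omega

-- ===== VERDICT (by name: the statement is the Claim_ definition above) =====
theorem compar_spec : Claim_equal_compar := by
  intro a b _
  unfold Spec_compar compar compar_alt
  exact comparLoop_eq a.toList b.toList
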